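-- pv_equiv track=rewrite | github.com/drahoj/Project2 | TIC_TAC_TOE.py | vypln_hraci_kostku
-- ===== SOURCE A (Python) =====
-- def vypln_hraci_kostku(tahy,kostka_data) -> list:
--   """ funkce zapisuje do hraci kostky tahy hracu"""
--   radek = [1,3,5]
--   for cislo_radku in radek:
--     znaky_radku = kostka_data[cislo_radku][1]
--     nove_znaky = ''
--     for i,znak in enumerate(znaky_radku):
--       if cislo_radku == 1:
--         pozice = 0
--       if cislo_radku == 3:
--         pozice = 3
--       if cislo_radku == 5:
--         pozice = 6
--       if i == 2:
--         nove_znaky += tahy[pozice]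
--       elif i == 6:
--         nove_znaky += tahy[pozice+1]
--       elif i == 10:
--         nove_znaky += tahy[pozice+2]
--       else:
--         nove_znaky += znak
--     kostka_data[cislo_radku][1] = nove_znaky
--   return kostka_data
-- ===== SOURCE B (Python) =====
-- def vypln_hraci_kostku(tahy, kostka_data) -> list:
--     """ funkce zapisuje do hraci kostky tahy hracu (prima adresace pozic) """
--     for radek, zaklad in ((1, 0), (3, 3), (5, 6)):
--         znaky = list(kostka_data[radek][1])
--         for i, posun in ((2, 0), (6, 1), (10, 2)):
--             if i < len(znaky):
--                 znaky[i] = tahy[zaklad + posun]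
--         kostka_data[radek][1] = ''.join(znaky)
--     return kostka_data
-- ===== Notes on version B (the rewrite author's own statement) =====
-- stated objective: simpler
-- what changed: Instead of rebuilding each row string by enumerating every character and branching on the index, B splits the row into a cell list and directly assigns the three fixed slots (2, 6, 10) from tahy, skipping slots past the end, then joins.
import Mathlib
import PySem

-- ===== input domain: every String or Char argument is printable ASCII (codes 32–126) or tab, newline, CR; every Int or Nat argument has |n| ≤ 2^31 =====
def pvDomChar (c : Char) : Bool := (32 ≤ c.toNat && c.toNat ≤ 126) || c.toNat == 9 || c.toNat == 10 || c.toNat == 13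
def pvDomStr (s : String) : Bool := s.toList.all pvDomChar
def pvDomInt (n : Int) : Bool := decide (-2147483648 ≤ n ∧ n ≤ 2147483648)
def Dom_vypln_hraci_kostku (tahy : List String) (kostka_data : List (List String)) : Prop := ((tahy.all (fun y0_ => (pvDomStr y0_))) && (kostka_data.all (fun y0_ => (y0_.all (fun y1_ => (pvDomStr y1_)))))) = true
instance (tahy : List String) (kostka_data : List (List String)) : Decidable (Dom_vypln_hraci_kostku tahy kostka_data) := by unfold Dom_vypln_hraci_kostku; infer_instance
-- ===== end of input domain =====

-- B replaces A's per-character enumerate/branch scan with direct positional assignment into a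
-- list of cells (objective: simpler). Both A and B mutate kostka_data in place in Python; the
-- equivalence proved here is about the RETURN value (which is the mutated list in both).


-- ===== PORT A =====
-- inner loop of A: for i,znak in enumerate(znaky_radku): nove_znaky += <branch>
-- (acc is the List Char of nove_znaky; each branch appends, as in the Python)
def pvRowA (tahy : List String) (cislo_radku : Nat) (znaky_radku : String) : String :=
  String.ofList ((PySem.List.enumerate znaky_radku.toList 0).foldl
    (fun acc p =>
      let pozice : Int := if cislo_radku == 1 then 0 else if cislo_radku == 3 then 3 else 6
      acc ++ (if p.1 == 2 then (PySem.List.pyGetD tahy pozice "").toList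
        else if p.1 == 6 then (PySem.List.pyGetD tahy (pozice + 1) "").toList
        else if p.1 == 10 then (PySem.List.pyGetD tahy (pozice + 2) "").toList
        else [p.2])) [])

def vypln_hraci_kostku (tahy : List String) (kostka_data : List (List String)) : List (List String) :=
  [1, 3, 5].foldl (fun kd cislo_radku =>
    let znaky_radku := (kd.getD cislo_radku []).getD 1 ""
    let nove_znaky := pvRowA tahy cislo_radku znaky_radku
    kd.set cislo_radku ((kd.getD cislo_radku []).set 1 nove_znaky)) kostka_data

-- ===== PORT B =====
-- inner loop of B: for i,posun in ((2,0),(6,1),(10,2)): if i < len(znaky): znaky[i] = tahy[zaklad+posun]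
def pvRowB (tahy : List String) (zaklad : Int) (s : String) : String :=
  PySem.Str.join "" (([((2 : Nat), (0 : Int)), (6, 1), (10, 2)]).foldl
    (fun znaky q =>
      if q.1 < znaky.length then znaky.set q.1 (PySem.List.pyGetD tahy (zaklad + q.2) "") else znaky)
    (s.toList.map (fun c => String.ofList [c])))

def vypln_hraci_kostku_alt (tahy : List String) (kostka_data : List (List String)) : List (List String) :=
  [((1 : Nat), (0 : Int)), (3, 3), (5, 6)].foldl (fun kd p =>
    kd.set p.1 ((kd.getD p.1 []).set 1 (pvRowB tahy p.2 ((kd.getD p.1 []).getD 1 "")))) kostka_data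

-- ===== PRECONDITION & SPEC =====
-- Pre_ excludes exactly the inputs on which the Python A raises IndexError: fewer than 6 rows,
-- a row 1/3/5 with fewer than 2 cells, or tahy too short for the slots the row string reaches.
def pvPreRow (tahy : List String) (kostka_data : List (List String)) (r : Nat) (zaklad : Nat) : Prop :=
  2 ≤ (kostka_data.getD r []).length ∧
  (3 ≤ ((kostka_data.getD r []).getD 1 "").toList.length → zaklad + 1 ≤ tahy.length) ∧
  (7 ≤ ((kostka_data.getD r []).getD 1 "").toList.length → zaklad + 2 ≤ tahy.length) ∧
  (11 ≤ ((kostka_data.getD r []).getD 1 "").toList.length → zaklad + 3 ≤ tahy.length)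

def Pre_vypln_hraci_kostku (tahy : List String) (kostka_data : List (List String)) : Prop :=
  6 ≤ kostka_data.length ∧
  pvPreRow tahy kostka_data 1 0 ∧ pvPreRow tahy kostka_data 3 3 ∧ pvPreRow tahy kostka_data 5 6

instance (tahy : List String) (kostka_data : List (List String)) : Decidable (Pre_vypln_hraci_kostku tahy kostka_data) := by
  unfold Pre_vypln_hraci_kostku pvPreRow; infer_instance

def pvWitness_vypln_hraci_kostku : List String × List (List String) :=
  (["X", "O", "X", "O", "X", "O", "X", "O", "X"],
   [["a", "z"], ["b", " | | | "], ["c", "z"], ["d", " | | | "], ["e", "z"], ["f", " | | | "]])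

def Spec_vypln_hraci_kostku (tahy : List String) (kostka_data : List (List String)) (out : List (List String)) : Prop := out = vypln_hraci_kostku_alt tahy kostka_data
instance (tahy : List String) (kostka_data : List (List String)) (out : List (List String)) : Decidable (Spec_vypln_hraci_kostku tahy kostka_data out) := by unfold Spec_vypln_hraci_kostku; infer_instance

-- ===== CLAIM (what is proved, stated in full; the proofs are below) =====
def Claim_equal_vypln_hraci_kostku : Prop := ∀ (tahy : List String) (kostka_data : List (List String)), Dom_vypln_hraci_kostku tahy kostka_data → Pre_vypln_hraci_kostku tahy kostka_data → Spec_vypln_hraci_kostku tahy kostka_data (vypln_hraci_kostku tahy kostka_data)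

-- ===== LEMMAS AND PROOFS =====

lemma pv_join_nil_sep (ls : List (List Char)) : PySem.Chars.join [] ls = ls.flatten := by
  induction ls with
  | nil => simp [PySem.Chars.join_nil]
  | cons p rest ih =>
    cases rest with
    | nil => simp [PySem.Chars.join_singleton]
    | cons q t => simp [PySem.Chars.join_cons_cons, ih]

lemma pv_set_guard {α : Type} (l : List α) (i : Nat) (v : α) :
    (if i < l.length then l.set i v else l) = l.set i v := by
  split_ifs with h
  · rfl
  · exact (List.set_eq_of_length_le (by omega)).symm

lemma pv_row_core (tahy : List String) (pozice : Int) (s : String) :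
    String.ofList ((PySem.List.enumerate s.toList 0).foldl
      (fun acc p =>
        acc ++ (if p.1 == 2 then (PySem.List.pyGetD tahy pozice "").toList
          else if p.1 == 6 then (PySem.List.pyGetD tahy (pozice + 1) "").toList
          else if p.1 == 10 then (PySem.List.pyGetD tahy (pozice + 2) "").toList
          else [p.2])) [])
    = pvRowB tahy pozice s := by
  apply String.toList_inj.mp
  rw [PySem.List.foldl_append_eq_flatMap]
  unfold pvRowB
  rw [PySem.Str.toList_join]
  simp only [List.foldl, pv_set_guard, String.toList_ofList, List.nil_append, List.flatMap_def]
  rw [show ("" : String).toList = [] from rfl, pv_join_nil_sep]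
  congr 1
  apply List.ext_getElem
  · simp [PySem.List.length_enumerate]
  · intro k h1 h2
    have hk : k < s.toList.length := by simpa [PySem.List.length_enumerate] using h1
    simp only [List.getElem_map, PySem.List.getElem_enumerate, List.getElem_set]
    by_cases e2 : k = 2
    · subst e2; norm_num
    · by_cases e6 : k = 6
      · subst e6; norm_num
      · by_cases e10 : k = 10
        · subst e10; norm_num
        · have n2 : ¬(2 = k) := fun h => e2 h.symm
          have n6 : ¬(6 = k) := fun h => e6 h.symm
          have n10 : ¬(10 = k) := fun h => e10 h.symm
          have j2 : ¬((k : Int) = 2) := by omega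
          have j6 : ¬((k : Int) = 6) := by omega
          have j10 : ¬((k : Int) = 10) := by omega
          simp [j2, j6, j10, n2, n6, n10]

-- ===== VERDICT (by name: the statement is the Claim_ definition above) =====
theorem vypln_hraci_kostku_spec : Claim_equal_vypln_hraci_kostku := by
  intro tahy kd _ _
  unfold Spec_vypln_hraci_kostku vypln_hraci_kostku vypln_hraci_kostku_alt
  simp only [List.foldl]
  rw [show pvRowA tahy 1 = pvRowB tahy 0 from funext fun s => by
        simpa [pvRowA] using pv_row_core tahy 0 s,
      show pvRowA tahy 3 = pvRowB tahy 3 from funext fun s => by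
        simpa [pvRowA] using pv_row_core tahy 3 s,
      show pvRowA tahy 5 = pvRowB tahy 6 from funext fun s => by
        simpa [pvRowA] using pv_row_core tahy 6 s]
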